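-- pv_equiv track=rewrite | github.com/dborowiec10/conductor | src/conductor/component/method/flex/utils.py | gen_group
-- ===== SOURCE A (Python) =====
-- def _dfs_gen_group(cur, elements, p, length, left_groups, res, padding):
--     if left_groups == 1:
--         res.append(cur + [length] * (1 + padding))
--     elif left_groups > 1:
--         # _dfs_gen_group(cur, elements, p, length, left_groups-1, res)
--         for i in range(p + 1, length):
--             _dfs_gen_group(cur + [i], elements, i, length, left_groups - 1, res, padding)
--     else:
--         raise RuntimeError("At least 1 group")
--
-- def gen_group(elements, most_groups=3):
--     res = []
--     length = len(elements)
--     lower = min(length, most_groups)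
--     upper = min(length, most_groups)
--     for groups in range(lower, upper + 1):
--         _dfs_gen_group([], elements, 0, length, groups, res, most_groups - groups)
--     return res
-- ===== SOURCE B (Python) =====
-- def gen_group(elements, most_groups=3):
--     length = len(elements)
--     groups = min(length, most_groups)
--     if groups < 1:
--         raise RuntimeError("At least 1 group")
--     combos = [[]]
--     for _ in range(groups - 1):
--         combos = [c + [i] for c in combos
--                   for i in range((c[-1] if c else 0) + 1, length)]
--     tail = [length] * (1 + most_groups - groups)
--     return [c + tail for c in combos]
-- ===== Notes on version B (the rewrite author's own statement) =====
-- stated objective: simpler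
-- what changed: Replaced the recursive cut-point DFS (helper with 7 parameters appending to a shared res) by an iterative level-by-level construction: start from [[]] and extend every prefix by each admissible next cut point groups-1 times, then append the padding tail in one comprehension.
import Mathlib
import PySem

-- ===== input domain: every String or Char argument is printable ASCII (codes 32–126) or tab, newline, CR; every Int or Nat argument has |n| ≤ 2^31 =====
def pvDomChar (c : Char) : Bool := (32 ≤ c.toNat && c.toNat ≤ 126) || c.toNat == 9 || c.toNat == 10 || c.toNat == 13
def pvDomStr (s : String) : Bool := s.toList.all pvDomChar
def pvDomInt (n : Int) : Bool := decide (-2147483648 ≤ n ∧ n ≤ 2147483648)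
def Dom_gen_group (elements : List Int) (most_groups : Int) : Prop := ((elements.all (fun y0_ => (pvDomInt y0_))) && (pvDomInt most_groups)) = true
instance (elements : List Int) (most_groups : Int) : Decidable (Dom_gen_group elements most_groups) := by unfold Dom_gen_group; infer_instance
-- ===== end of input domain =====

-- B replaces A's recursive cut-point DFS by an iterative level-by-level extension of prefixes (simpler decomposition, same cost).


-- ===== PORT A =====
-- literal port of _dfs_gen_group; res is threaded as state ('res.append' becomes '++ [..]');
-- the 'else: raise RuntimeError' branch (left_groups < 1) is excluded by Pre_gen_group and returns res unchanged here
def pv_dfs_gen_group (cur : List Int) (elements : List Int) (p length left_groups : Int)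
    (res : List (List Int)) (padding : Int) : List (List Int) :=
  if left_groups = 1 then
    res ++ [cur ++ List.replicate (1 + padding).toNat length]
  else if left_groups > 1 then
    (PySem.List.pyRange (p + 1) length 1).foldl
      (fun acc i => pv_dfs_gen_group (cur ++ [i]) elements i length (left_groups - 1) acc padding) res
  else
    res
termination_by left_groups.toNat
decreasing_by omega

def gen_group (elements : List Int) (most_groups : Int) : List (List Int) :=
  let res : List (List Int) := []
  let length : Int := PySem.List.len elements
  let lower := min length most_groups
  let upper := min length most_groups
  (PySem.List.pyRange lower (upper + 1) 1).foldl
    (fun res groups => pv_dfs_gen_group [] elements 0 length groups res (most_groups - groups)) res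

-- ===== PORT B =====
def gen_group_alt (elements : List Int) (most_groups : Int) : List (List Int) :=
  let length : Int := PySem.List.len elements
  let groups := min length most_groups
  if groups < 1 then []   -- Python B raises RuntimeError here; excluded by Pre_gen_group
  else
    let combos := (List.range (groups - 1).toNat).foldl
      (fun cs _ => cs.flatMap (fun c =>
        (PySem.List.pyRange ((c.getLast?.getD 0) + 1) length 1).map (fun i => c ++ [i]))) [[]]
    let tail := List.replicate (1 + most_groups - groups).toNat length
    combos.map (fun c => c ++ tail)

-- ===== PRECONDITION & SPEC =====
-- Pre_ excludes exactly the inputs where A raises RuntimeError (min(len(elements), most_groups) < 1); B raises there too.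
def Pre_gen_group (elements : List Int) (most_groups : Int) : Prop :=
  1 ≤ (elements.length : Int) ∧ 1 ≤ most_groups
instance (elements : List Int) (most_groups : Int) : Decidable (Pre_gen_group elements most_groups) := by
  unfold Pre_gen_group; infer_instance
def pvWitness_gen_group : List Int × Int := ([5, 7, 9], 2)

def Spec_gen_group (elements : List Int) (most_groups : Int) (out : List (List Int)) : Prop := out = gen_group_alt elements most_groups
instance (elements : List Int) (most_groups : Int) (out : List (List Int)) : Decidable (Spec_gen_group elements most_groups out) := by unfold Spec_gen_group; infer_instance

-- ===== CLAIM (what is proved, stated in full; the proofs are below) =====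
def Claim_equal_gen_group : Prop := ∀ (elements : List Int) (most_groups : Int), Dom_gen_group elements most_groups → Pre_gen_group elements most_groups → Spec_gen_group elements most_groups (gen_group elements most_groups)

-- ===== LEMMAS AND PROOFS =====

-- depth-first enumeration of increasing cut-point tuples of length g drawn from (p, length)
def pvCombs (length : Int) (p : Int) : Nat → List (List Int)
  | 0 => [[]]
  | g + 1 => (PySem.List.pyRange (p + 1) length 1).flatMap
      (fun i => (pvCombs length i g).map (fun c => i :: c))

-- one level of B's construction
def pvStep (length : Int) (cs : List (List Int)) : List (List Int) :=
  cs.flatMap (fun c => (PySem.List.pyRange ((c.getLast?.getD 0) + 1) length 1).map (fun i => c ++ [i]))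

lemma pv_foldl_const {α : Type} (f : List (List Int) → List (List Int)) (l : List α)
    (cs : List (List Int)) : l.foldl (fun s _ => f s) cs = f^[l.length] cs := by
  induction l generalizing cs with
  | nil => rfl
  | cons x xs ih => simp [List.foldl_cons, ih, Function.iterate_succ_apply]

lemma pvStep_flatMap (length : Int) (cs : List (List Int)) :
    pvStep length cs = cs.flatMap (fun c => pvStep length [c]) := by
  simp [pvStep]

lemma pv_iter_flatMap (length : Int) (k : Nat) (cs : List (List Int)) :
    (pvStep length)^[k] cs = cs.flatMap (fun c => (pvStep length)^[k] [c]) := by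
  induction k generalizing cs with
  | zero => simp
  | succ k ih =>
    rw [Function.iterate_succ_apply, ih (pvStep length cs), pvStep_flatMap length cs,
        List.flatMap_assoc]
    congr 1
    funext c
    rw [Function.iterate_succ_apply, ih (pvStep length [c])]

lemma pv_iter_single (length : Int) (k : Nat) (c : List Int) :
    (pvStep length)^[k] [c]
      = (pvCombs length (c.getLast?.getD 0) k).map (fun t => c ++ t) := by
  induction k generalizing c with
  | zero => simp [pvCombs]
  | succ k ih =>
    rw [Function.iterate_succ_apply, pv_iter_flatMap]
    have hstep : pvStep length [c]
        = (PySem.List.pyRange ((c.getLast?.getD 0) + 1) length 1).map (fun i => c ++ [i]) := by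
      simp [pvStep]
    rw [hstep, List.flatMap_map, pvCombs, List.map_flatMap]
    congr 1
    funext i
    rw [ih (c ++ [i])]
    simp [List.map_map, Function.comp]

-- A's dfs appends exactly the combinations, with cur prefixed and the tail appended
lemma pv_dfs_eq (elements : List Int) (length padding : Int) :
    ∀ (n : Nat) (left : Int), left.toNat = n → 1 ≤ left →
    ∀ (cur : List Int) (p : Int) (res : List (List Int)),
    pv_dfs_gen_group cur elements p length left res padding
      = res ++ (pvCombs length p (left - 1).toNat).map
          (fun c => cur ++ c ++ List.replicate (1 + padding).toNat length) := by
  intro n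
  induction n with
  | zero => intro left hn hleft; omega
  | succ n ih =>
    intro left hn hleft cur p res
    rw [pv_dfs_gen_group]
    by_cases h1 : left = 1
    · subst h1
      simp [pvCombs]
    · have hgt : left > 1 := by omega
      rw [if_neg h1, if_pos hgt]
      have key : ∀ (l : List Int) (acc : List (List Int)),
          l.foldl (fun acc i => pv_dfs_gen_group (cur ++ [i]) elements i length (left - 1) acc padding) acc
            = acc ++ l.flatMap (fun i => (pvCombs length i (left - 1 - 1).toNat).map
                (fun c => cur ++ [i] ++ c ++ List.replicate (1 + padding).toNat length)) := by
        intro l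
        induction l with
        | nil => simp
        | cons x xs ihl =>
          intro acc
          simp only [List.foldl_cons, List.flatMap_cons]
          rw [ih (left - 1) (by omega) (by omega) (cur ++ [x]) x acc, ihl]
          simp
      rw [key]
      have hc : (left - 1).toNat = ((left - 1 - 1).toNat) + 1 := by omega
      rw [hc, pvCombs, List.map_flatMap]
      congr 1
      congr 1
      funext i
      simp [List.map_map, Function.comp, List.append_assoc]

theorem gen_group_eq_alt (elements : List Int) (most_groups : Int)
    (hpre : Pre_gen_group elements most_groups) :
    gen_group elements most_groups = gen_group_alt elements most_groups := by
  obtain ⟨h1, h2⟩ := hpre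
  unfold gen_group gen_group_alt
  simp only [PySem.List.len_eq]
  set L : Int := (elements.length : Int) with hL
  set g : Int := min L most_groups with hg
  have hg1 : 1 ≤ g := by omega
  rw [PySem.List.pyRange_one_singleton]
  simp only [List.foldl_cons, List.foldl_nil]
  rw [if_neg (by omega : ¬ g < 1)]
  rw [pv_dfs_eq elements L (most_groups - g) g.toNat g rfl hg1 [] 0 []]
  have hbody : (fun (cs : List (List Int)) (_ : Nat) => cs.flatMap (fun c =>
      (PySem.List.pyRange ((c.getLast?.getD 0) + 1) L 1).map (fun i => c ++ [i])))
      = fun cs _ => pvStep L cs := rfl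
  rw [hbody, pv_foldl_const (pvStep L) (List.range (g - 1).toNat) [[]], List.length_range,
      pv_iter_single L (g - 1).toNat []]
  have htail : 1 + (most_groups - g) = 1 + most_groups - g := by ring
  rw [htail]
  simp [List.map_map]

-- ===== VERDICT (by name: the statement is the Claim_ definition above) =====
theorem gen_group_spec : Claim_equal_gen_group := by
  intro elements most_groups _ hpre
  unfold Spec_gen_group
  exact gen_group_eq_alt elements most_groups hpre
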